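-- pv_equiv track=rewrite | github.com/Amneet47/codewars-amneet47 | 7kyu/cartesian_plane.py | sumin
-- ===== SOURCE A (Python) =====
-- def sumin(n):
--     summin = 0
--     j = (2 * n) - 1
--     for i in range(1, n + 1):
--         summin += (i * j)
--         i += 1
--         j -= 2
--     return summin
-- ===== SOURCE B (Python) =====
-- def sumin(n):
--     return n * (n + 1) * (2 * n + 1) // 6 if n > 0 else 0
-- ===== Notes on version B (the rewrite author's own statement) =====
-- stated objective: faster
-- what changed: Replaces the loop summing i*(2n+1-2i) with the closed-form square-pyramidal formula n(n+1)(2n+1)/6.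
import Mathlib
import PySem

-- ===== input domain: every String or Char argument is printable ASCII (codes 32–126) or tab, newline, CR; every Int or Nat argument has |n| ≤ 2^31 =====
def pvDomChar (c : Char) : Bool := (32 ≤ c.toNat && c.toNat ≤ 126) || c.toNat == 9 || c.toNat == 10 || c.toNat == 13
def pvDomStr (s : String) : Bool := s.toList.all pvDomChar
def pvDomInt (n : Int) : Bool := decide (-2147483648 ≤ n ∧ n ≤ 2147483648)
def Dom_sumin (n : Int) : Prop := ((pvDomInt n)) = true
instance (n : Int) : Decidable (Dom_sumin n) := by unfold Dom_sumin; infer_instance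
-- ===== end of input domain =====

-- B replaces the O(n) summation loop with the O(1) closed-form formula n(n+1)(2n+1)//6.


-- ===== PORT A =====
-- loop state: (summin, j); 'i += 1' in the body has no effect on the next iteration and is dropped
def sumin (n : Int) : Int :=
  (PySem.List.pyRange 1 (n + 1) 1).foldl
    (fun (st : Int × Int) i => (st.1 + i * st.2, st.2 - 2))
    (0, (2 * n) - 1) |>.1

-- ===== PORT B =====
def sumin_alt (n : Int) : Int :=
  if n > 0 then PySem.Int.floordiv (n * (n + 1) * (2 * n + 1)) 6 else 0

-- ===== PRECONDITION & SPEC =====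
def Spec_sumin (n : Int) (out : Int) : Prop := out = sumin_alt n
instance (n : Int) (out : Int) : Decidable (Spec_sumin n out) := by unfold Spec_sumin; infer_instance

-- ===== CLAIM (what is proved, stated in full; the proofs are below) =====
def Claim_equal_sumin : Prop := ∀ (n : Int), Dom_sumin n → Spec_sumin n (sumin n)

-- ===== LEMMAS AND PROOFS =====

-- invariant of A's loop after k iterations (stated as 6 * sum = polynomial to stay in integers)
theorem sumin_loop (n : Int) (k : Nat) :
    6 * ((PySem.List.pyRange 1 ((k : Int) + 1) 1).foldl
      (fun (st : Int × Int) i => (st.1 + i * st.2, st.2 - 2)) (0, (2 * n) - 1)).1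
      = (k : Int) * (k + 1) * (3 * (2 * n + 1) - 2 * (2 * k + 1))
    ∧ ((PySem.List.pyRange 1 ((k : Int) + 1) 1).foldl
      (fun (st : Int × Int) i => (st.1 + i * st.2, st.2 - 2)) (0, (2 * n) - 1)).2
      = (2 * n) - 1 - 2 * k := by
  induction k with
  | zero =>
      rw [show ((0 : Nat) : Int) + 1 = 1 by norm_num, PySem.List.pyRange_one_eq_nil (by omega)]
      norm_num
  | succ m ih =>
      obtain ⟨h1, h2⟩ := ih
      rw [show ((m + 1 : Nat) : Int) + 1 = ((m : Int) + 1) + 1 by push_cast; ring,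
          PySem.List.pyRange_one_succ_right (show (1:Int) ≤ (m:Int) + 1 by omega), List.foldl_append]
      simp only [List.foldl_cons, List.foldl_nil]
      constructor
      · push_cast
        rw [h2]
        linear_combination h1
      · push_cast
        rw [h2]
        ring

theorem sumin_eq_closed (n : Int) : sumin n = sumin_alt n := by
  unfold sumin sumin_alt
  by_cases h : n > 0
  · have hn : n = ((n.toNat : Int)) := by omega
    rw [hn]
    obtain ⟨h1, _⟩ := sumin_loop ((n.toNat : Int)) n.toNat
    rw [PySem.Int.floordiv_eq_ediv_of_pos (by norm_num)]
    simp only [gt_iff_lt, show (0:Int) < (n.toNat : Int) by omega, if_true]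
    have : (n.toNat : Int) * ((n.toNat : Int) + 1) * (2 * (n.toNat : Int) + 1)
        = 6 * ((PySem.List.pyRange 1 ((n.toNat : Int) + 1) 1).foldl
            (fun (st : Int × Int) i => (st.1 + i * st.2, st.2 - 2)) (0, (2 * (n.toNat : Int)) - 1)).1 := by
      rw [h1]; ring
    rw [this, Int.mul_ediv_cancel_left _ (by norm_num)]
  · have hz : n + 1 ≤ 1 := by omega
    rw [PySem.List.pyRange_one_eq_nil hz]
    simp [h]

-- ===== VERDICT (by name: the statement is the Claim_ definition above) =====
theorem sumin_spec : Claim_equal_sumin := by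
  intro n _
  unfold Spec_sumin
  exact sumin_eq_closed n
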